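-- pv_equiv track=rewrite | github.com/AnSloge/inf273-assignments | assignments/assignment4/src/simulated_annealing_new_operators.py | _assign_trips_to_drones
-- ===== SOURCE A (Python) =====
-- from typing import Any, Dict, List, Optional, Set, Tuple
--
-- def _assign_trips_to_drones(
--     converted_trips: List[Tuple[int, int, int]],
--     n_drones: int,
-- ) -> Tuple[List[int], List[int], List[int]]:
--     """Greedy interval assignment by launch index to produce part2/part3/part4 encoding."""
--     drone_jobs: List[List[Tuple[int, int, int]]] = [[] for _ in range(n_drones)]
--     drone_last_reconvene = [-1 for _ in range(n_drones)]
--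
--     for customer, launch_cell, reconvene_cell in sorted(converted_trips, key=lambda item: item[1]):
--         chosen = None
--         for d in range(n_drones):
--             if launch_cell - 1 >= drone_last_reconvene[d]:
--                 chosen = d
--                 break
--
--         # If all drones overlap, place on the earliest finishing drone.
--         # Feasibility checks later decide if this candidate is usable.
--         if chosen is None:
--             chosen = min(range(n_drones), key=lambda idx: drone_last_reconvene[idx])
--
--         drone_jobs[chosen].append((customer, launch_cell, reconvene_cell))
--         drone_last_reconvene[chosen] = reconvene_cell - 1
--
--     part2: List[int] = []
--     part3: List[int] = []
--     part4: List[int] = []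
--
--     for d in range(n_drones):
--         for customer, launch_cell, reconvene_cell in drone_jobs[d]:
--             part2.append(int(customer))
--             part3.append(int(launch_cell))
--             part4.append(int(reconvene_cell))
--         if d < n_drones - 1:
--             part2.append(-1)
--             part3.append(-1)
--             part4.append(-1)
--
--     return part2, part3, part4
-- ===== SOURCE B (Python) =====
-- from typing import List, Tuple
--
--
-- def _assign_trips_to_drones(
--     converted_trips: List[Tuple[int, int, int]],
--     n_drones: int,
-- ) -> Tuple[List[int], List[int], List[int]]:
--     """Segment-tree drone selection: one tree descent finds the leftmost drone
--     free by the launch cell, else the leftmost earliest-finishing drone."""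
--     # tournament tree over drone indices; node = ('node', min, mid, left, right),
--     # leaf = ('leaf', idx, last_reconvene)
--
--     def tmin(t):
--         return t[2] if t[0] == 'leaf' else t[1]
--
--     def build(lo, n):
--         if n == 1:
--             return ('leaf', lo, -1)
--         half = n // 2
--         l = build(lo, half)
--         r = build(lo + half, n - half)
--         return ('node', min(tmin(l), tmin(r)), lo + half, l, r)
--
--     def query(t, thr):
--         # leftmost index whose value is <= thr (requires tmin(t) <= thr)
--         if t[0] == 'leaf':
--             return t[1]
--         _, _, _, l, r = t
--         return query(l, thr) if tmin(l) <= thr else query(r, thr)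
--
--     def update(t, i, v):
--         if t[0] == 'leaf':
--             return ('leaf', t[1], v)
--         _, _, mid, l, r = t
--         if i < mid:
--             l = update(l, i, v)
--         else:
--             r = update(r, i, v)
--         return ('node', min(tmin(l), tmin(r)), mid, l, r)
--
--     buckets: List[List[Tuple[int, int, int]]] = [[] for _ in range(n_drones)]
--     tree = build(0, n_drones) if n_drones >= 1 else None
--
--     for trip in sorted(converted_trips, key=lambda item: item[1]):
--         _, launch_cell, reconvene_cell = trip
--         thr = launch_cell - 1
--         if tmin(tree) <= thr:
--             chosen = query(tree, thr)
--         else: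
--             chosen = query(tree, tmin(tree))
--         buckets[chosen].append(trip)
--         tree = update(tree, chosen, reconvene_cell - 1)
--
--     rows: List[Tuple[int, int, int]] = []
--     for d, jobs in enumerate(buckets):
--         rows.extend(jobs)
--         if d < n_drones - 1:
--             rows.append((-1, -1, -1))
--
--     part2 = [c for c, _, _ in rows]
--     part3 = [l for _, l, _ in rows]
--     part4 = [r for _, _, r in rows]
--     return part2, part3, part4
-- ===== Notes on version B (the rewrite author's own statement) =====
-- stated objective: alternative
-- what changed: Replaces A's per-trip linear scan over all drones (plus a min() fallback scan) by a tournament/segment tree over the drones' last-reconvene cells answering 'leftmost drone with value <= launch-1, else leftmost argmin' via one descent with point updates, and builds the output rows in one enumerate pass instead of three parallel appends; on the harness's trip-heavy, few-drone inputs this is not measurably faster.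
import Mathlib
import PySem

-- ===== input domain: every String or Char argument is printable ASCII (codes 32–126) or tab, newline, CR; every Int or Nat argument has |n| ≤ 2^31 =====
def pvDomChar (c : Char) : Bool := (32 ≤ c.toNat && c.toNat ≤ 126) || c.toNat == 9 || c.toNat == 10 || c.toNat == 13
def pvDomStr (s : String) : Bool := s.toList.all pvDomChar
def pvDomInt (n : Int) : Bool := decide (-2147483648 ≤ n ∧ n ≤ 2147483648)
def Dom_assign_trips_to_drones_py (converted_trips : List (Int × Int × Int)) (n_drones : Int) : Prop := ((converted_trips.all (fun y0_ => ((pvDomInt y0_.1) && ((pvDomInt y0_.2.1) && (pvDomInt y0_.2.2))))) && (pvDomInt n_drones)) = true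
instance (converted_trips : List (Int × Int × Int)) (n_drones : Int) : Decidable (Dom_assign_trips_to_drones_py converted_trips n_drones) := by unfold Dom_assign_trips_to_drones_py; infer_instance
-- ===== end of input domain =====

-- B replaces A's per-trip linear drone scan (plus a min() argmin fallback scan) by a
-- tournament/segment tree over the drones' last-reconvene cells: a single descent finds
-- the leftmost drone with value ≤ launch-1 (else the leftmost argmin), with point updates.

-- ===== PORT A =====
-- loop body of A's assignment loop (for ... in sorted(...)): linear scan with break, then min-fallback
def aStep (n_drones : Int) (s : List (List (Int × Int × Int)) × List Int) (trip : Int × Int × Int) :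
    List (List (Int × Int × Int)) × List Int :=
  let chosen0 : Option Int :=
    (PySem.List.pyRange 0 n_drones 1).foldl
      (fun acc d =>
        if acc.isSome then acc
        else if trip.2.1 - 1 ≥ PySem.List.pyGetD s.2 d 0 then some d else none)
      none
  -- 'if chosen is None: chosen = min(range(n_drones), key=...)';
  -- Python raises ValueError on an empty range there; Pre_ excludes that
  let chosen : Int :=
    chosen0.getD
      ((PySem.List.min? (PySem.List.pyRange 0 n_drones 1) (fun idx => PySem.List.pyGetD s.2 idx 0)).getD 0)
  (PySem.List.pySetD s.1 chosen (PySem.List.pyGetD s.1 chosen [] ++ [trip]),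
   PySem.List.pySetD s.2 chosen (trip.2.2 - 1))

def assign_trips_to_drones_py (converted_trips : List (Int × Int × Int)) (n_drones : Int) :
    List Int × List Int × List Int :=
  let drone_jobs : List (List (Int × Int × Int)) := (PySem.List.pyRange 0 n_drones 1).map (fun _ => [])
  let drone_last : List Int := (PySem.List.pyRange 0 n_drones 1).map (fun _ => (-1 : Int))
  let st := (PySem.List.sorted converted_trips (fun item => item.2.1) false).foldl
    (aStep n_drones) (drone_jobs, drone_last)
  (PySem.List.pyRange 0 n_drones 1).foldl
    (fun o d =>
      let o1 := (PySem.List.pyGetD st.1 d []).foldl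
        (fun o t => (o.1 ++ [t.1], o.2.1 ++ [t.2.1], o.2.2 ++ [t.2.2])) o
      if d < n_drones - 1 then (o1.1 ++ [-1], o1.2.1 ++ [-1], o1.2.2 ++ [-1]) else o1)
    ([], [], [])

-- ===== PORT B =====
-- tournament tree over drone indices: leaf idx val | node min mid left right
inductive DTree where
  | leaf : Int → Int → DTree
  | node : Int → Int → DTree → DTree → DTree
deriving Repr, DecidableEq

def tmin : DTree → Int
  | .leaf _ v => v
  | .node m _ _ _ => m

-- leftmost index with value ≤ thr (callers guarantee tmin t ≤ thr)
def dquery : DTree → Int → Int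
  | .leaf i _, _ => i
  | .node _ _ l r, thr => if tmin l ≤ thr then dquery l thr else dquery r thr

def dupdate : DTree → Int → Int → DTree
  | .leaf i _, _, v => .leaf i v
  | .node _ mid l r, i, v =>
    if i < mid then
      let l' := dupdate l i v
      .node (min (tmin l') (tmin r)) mid l' r
    else
      let r' := dupdate r i v
      .node (min (tmin l) (tmin r')) mid l r'

def dbuild (lo : Int) (n : Nat) : DTree :=
  if _h : n ≤ 1 then .leaf lo (-1)
  else
    let half := n / 2
    let l := dbuild lo half
    let r := dbuild (lo + (half : Int)) (n - half)
    .node (min (tmin l) (tmin r)) (lo + (half : Int)) l r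
termination_by n
decreasing_by all_goals omega

-- loop body of B's assignment loop; `none` is where the Python B raises on tree=None (excluded by Pre_)
def bStep (s : List (List (Int × Int × Int)) × Option DTree) (trip : Int × Int × Int) :
    List (List (Int × Int × Int)) × Option DTree :=
  match s.2 with
  | none => s
  | some tree =>
    let thr := trip.2.1 - 1
    let chosen : Int := if tmin tree ≤ thr then dquery tree thr else dquery tree (tmin tree)
    (PySem.List.pySetD s.1 chosen (PySem.List.pyGetD s.1 chosen [] ++ [trip]),
     some (dupdate tree chosen (trip.2.2 - 1)))

def assign_trips_to_drones_py_alt (converted_trips : List (Int × Int × Int)) (n_drones : Int) :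
    List Int × List Int × List Int :=
  let buckets0 : List (List (Int × Int × Int)) := (PySem.List.pyRange 0 n_drones 1).map (fun _ => [])
  let tree0 : Option DTree := if 1 ≤ n_drones then some (dbuild 0 n_drones.toNat) else none
  let st := (PySem.List.sorted converted_trips (fun item => item.2.1) false).foldl bStep (buckets0, tree0)
  let rows := (PySem.List.enumerate st.1).foldl
    (fun acc p => let a2 := acc ++ p.2; if p.1 < n_drones - 1 then a2 ++ [(-1, -1, -1)] else a2)
    ([] : List (Int × Int × Int))
  (rows.map (·.1), rows.map (·.2.1), rows.map (·.2.2))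

-- ===== PRECONDITION & SPEC =====
-- Pre_ excludes only inputs where BOTH programs raise: nonempty trips with n_drones ≤ 0
-- (A: ValueError from min() over an empty range; B: TypeError, no tree was built).
def Pre_assign_trips_to_drones_py (converted_trips : List (Int × Int × Int)) (n_drones : Int) : Prop :=
  converted_trips = [] ∨ 1 ≤ n_drones
instance (converted_trips : List (Int × Int × Int)) (n_drones : Int) : Decidable (Pre_assign_trips_to_drones_py converted_trips n_drones) := by unfold Pre_assign_trips_to_drones_py; infer_instance

def pvWitness_assign_trips_to_drones_py : (List (Int × Int × Int)) × Int := ([(1, 2, 3), (4, 1, 5)], 2)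

def Spec_assign_trips_to_drones_py (converted_trips : List (Int × Int × Int)) (n_drones : Int) (out : List Int × List Int × List Int) : Prop := out = assign_trips_to_drones_py_alt converted_trips n_drones
instance (converted_trips : List (Int × Int × Int)) (n_drones : Int) (out : List Int × List Int × List Int) : Decidable (Spec_assign_trips_to_drones_py converted_trips n_drones out) := by unfold Spec_assign_trips_to_drones_py; infer_instance

-- ===== CLAIM (what is proved, stated in full; the proofs are below) =====
def Claim_equal_assign_trips_to_drones_py : Prop := ∀ (converted_trips : List (Int × Int × Int)) (n_drones : Int), Dom_assign_trips_to_drones_py converted_trips n_drones → Pre_assign_trips_to_drones_py converted_trips n_drones → Spec_assign_trips_to_drones_py converted_trips n_drones (assign_trips_to_drones_py converted_trips n_drones)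

-- ===== LEMMAS AND PROOFS =====

-- `DRep t lo xs`: tree t represents the segment of drone values xs at offset lo
def DRep : DTree → Int → List Int → Prop
  | .leaf i v, lo, xs => i = lo ∧ xs = [v]
  | .node m mid l r, lo, xs =>
      ∃ xs1 xs2, xs = xs1 ++ xs2 ∧ xs1 ≠ [] ∧ DRep l lo xs1 ∧ DRep r mid xs2 ∧
        mid = lo + (xs1.length : Int) ∧ m = min (tmin l) (tmin r)

-- minimum of a nonempty list, as Python's min(x::xs)
def listMin : List Int → Int
  | [] => 0
  | x :: xs => xs.foldl min x

-- the common selection both programs compute, as an index into lr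
def pick (lr : List Int) (t : Int) : Nat :=
  match lr.findIdx? (fun v => decide (v ≤ t)) with
  | some k => k
  | none => (lr.findIdx? (fun v => decide (v ≤ listMin lr))).getD 0

theorem rep_ne_nil (t : DTree) (lo : Int) (xs : List Int) (h : DRep t lo xs) : xs ≠ [] := by
  induction t generalizing lo xs with
  | leaf i v => obtain ⟨rfl, rfl⟩ := h; simp
  | node m mid l r ihl ihr =>
    obtain ⟨xs1, xs2, rfl, hne, _⟩ := h
    cases xs1 with
    | nil => exact absurd rfl hne
    | cons a b => simp

theorem rep_tmin (t : DTree) (lo : Int) (xs : List Int) (h : DRep t lo xs) :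
    tmin t ∈ xs ∧ ∀ x ∈ xs, tmin t ≤ x := by
  induction t generalizing lo xs with
  | leaf i v => obtain ⟨rfl, rfl⟩ := h; simp [tmin]
  | node m mid l r ihl ihr =>
    obtain ⟨xs1, xs2, rfl, hne, hl, hr, hmid, hm⟩ := h
    obtain ⟨hlm, hlb⟩ := ihl lo xs1 hl
    obtain ⟨hrm, hrb⟩ := ihr mid xs2 hr
    subst hm
    have ht : tmin (DTree.node (min (tmin l) (tmin r)) mid l r) = min (tmin l) (tmin r) := rfl
    constructor
    · rw [ht]
      rcases min_cases (tmin l) (tmin r) with ⟨he, _⟩ | ⟨he, _⟩ <;> rw [he]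
      · exact List.mem_append.mpr (Or.inl hlm)
      · exact List.mem_append.mpr (Or.inr hrm)
    · intro x hx
      rw [ht]
      rcases List.mem_append.mp hx with hx | hx
      · exact le_trans (min_le_left _ _) (hlb x hx)
      · exact le_trans (min_le_right _ _) (hrb x hx)

theorem rep_query (t : DTree) (lo : Int) (xs : List Int) (thr : Int) (h : DRep t lo xs)
    (hle : tmin t ≤ thr) :
    ∃ k : Nat, xs.findIdx? (fun v => decide (v ≤ thr)) = some k ∧ k < xs.length ∧
      dquery t thr = lo + (k : Int) := by
  induction t generalizing lo xs with
  | leaf j w =>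
    obtain ⟨rfl, rfl⟩ := h
    have hw : w ≤ thr := by simpa [tmin] using hle
    exact ⟨0, by simp [List.findIdx?_cons, hw], by simp, by simp [dquery]⟩
  | node m mid l r ihl ihr =>
    obtain ⟨xs1, xs2, rfl, hne, hl, hr, hmid, hm⟩ := h
    by_cases hlt : tmin l ≤ thr
    · obtain ⟨k, hfi, hk, hq⟩ := ihl lo xs1 hl hlt
      refine ⟨k, ?_, ?_, ?_⟩
      · rw [List.findIdx?_append, hfi]; rfl
      · simp only [List.length_append]; omega
      · simp [dquery, hlt, hq]
    · have hmle : min (tmin l) (tmin r) ≤ thr := by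
        have : tmin (DTree.node m mid l r) ≤ thr := hle
        simpa [tmin, hm] using this
      have hrle : tmin r ≤ thr := by
        rcases min_le_iff.mp hmle with h' | h'
        · exact absurd h' hlt
        · exact h'
      obtain ⟨k, hfi, hk, hq⟩ := ihr mid xs2 hr hrle
      have hnone : xs1.findIdx? (fun v => decide (v ≤ thr)) = none := by
        rw [List.findIdx?_eq_none_iff]
        intro x hx
        have := (rep_tmin l lo xs1 hl).2 x hx
        simp only [decide_eq_false_iff_not, not_le]
        omega
      refine ⟨xs1.length + k, ?_, ?_, ?_⟩
      · rw [List.findIdx?_append, hnone, hfi]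
        simp [Option.or, Nat.add_comm]
      · simp only [List.length_append]; omega
      · simp only [dquery, if_neg hlt, hq, hmid]
        push_cast
        ring

theorem rep_update (t : DTree) (lo : Int) (xs : List Int) (i v : Int) (h : DRep t lo xs)
    (h1 : lo ≤ i) (h2 : i < lo + (xs.length : Int)) :
    DRep (dupdate t i v) lo (xs.set (i - lo).toNat v) := by
  induction t generalizing lo xs with
  | leaf j w =>
    obtain ⟨rfl, rfl⟩ := h
    have h0 : (i - j).toNat = 0 := by simp at h2; omega
    simp [dupdate, DRep, h0]
  | node m mid l r ihl ihr =>
    obtain ⟨xs1, xs2, rfl, hne, hl, hr, hmid, hm⟩ := h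
    have hlen : ((xs1 ++ xs2).length : Int) = (xs1.length : Int) + (xs2.length : Int) := by
      simp
    by_cases hi : i < mid
    · have hb2 : i < lo + (xs1.length : Int) := by omega
      have hrep := ihl lo xs1 hl h1 hb2
      have hidx : (i - lo).toNat < xs1.length := by omega
      have hset : (xs1 ++ xs2).set (i - lo).toNat v = xs1.set (i - lo).toNat v ++ xs2 := by
        rw [List.set_append, if_pos hidx]
      rw [hset]
      simp only [dupdate, if_pos hi]
      refine ⟨xs1.set (i - lo).toNat v, xs2, rfl, ?_, hrep, hr, ?_, rfl⟩
      · intro hc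
        apply hne
        have := congrArg List.length hc
        simpa using List.eq_nil_of_length_eq_zero (by simpa using this)
      · simpa using hmid
    · have hge : mid ≤ i := not_lt.mp hi
      have hb2 : i < mid + (xs2.length : Int) := by
        rw [hmid]; omega
      have hrep := ihr mid xs2 hr hge hb2
      have hidx : ¬ (i - lo).toNat < xs1.length := by omega
      have hidx2 : (i - lo).toNat - xs1.length = (i - mid).toNat := by omega
      have hset : (xs1 ++ xs2).set (i - lo).toNat v = xs1 ++ xs2.set (i - mid).toNat v := by
        rw [List.set_append, if_neg hidx, hidx2]
      rw [hset]
      simp only [dupdate, if_neg hi]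
      exact ⟨xs1, xs2.set (i - mid).toNat v, rfl, hne, hl, hrep, hmid, rfl⟩

theorem rep_build (n : Nat) (lo : Int) (hn : 1 ≤ n) :
    DRep (dbuild lo n) lo (List.replicate n (-1)) := by
  have main : ∀ (n : Nat) (lo : Int), 1 ≤ n → DRep (dbuild lo n) lo (List.replicate n (-1)) := by
    intro n
    induction n using Nat.strong_induction_on with
    | _ n ih =>
      intro lo hn'
      rw [dbuild]
      by_cases h1 : n ≤ 1
      · have : n = 1 := by omega
        subst this
        simp [DRep]
      · have h2 : 2 ≤ n := by omega
        have ihl := ih (n / 2) (by omega) lo (by omega)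
        have ihr := ih (n - n / 2) (by omega) (lo + ((n / 2 : Nat) : Int)) (by omega)
        simp only [dif_neg h1]
        refine ⟨List.replicate (n / 2) (-1), List.replicate (n - n / 2) (-1), ?_, ?_, ihl, ihr, ?_, rfl⟩
        · rw [← List.replicate_add]
          congr 1
          omega
        · simp only [ne_eq, List.replicate_eq_nil_iff]
          omega
        · simp
  exact main n lo hn

theorem listMin_spec (x : Int) (xs : List Int) :
    listMin (x :: xs) ∈ x :: xs ∧ ∀ y ∈ x :: xs, listMin (x :: xs) ≤ y := by
  constructor
  · rcases PySem.List.foldl_min_mem xs x with he | hm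
    · simp [listMin, he]
    · simp [listMin, hm]
  · intro y hy
    rcases List.mem_cons.mp hy with rfl | hy
    · exact (PySem.List.foldl_min_le xs y).1
    · exact (PySem.List.foldl_min_le xs x).2 y hy

theorem tmin_eq_listMin (t : DTree) (lo : Int) (xs : List Int) (h : DRep t lo xs) :
    tmin t = listMin xs := by
  obtain ⟨hm, hb⟩ := rep_tmin t lo xs h
  cases xs with
  | nil => exact absurd rfl (rep_ne_nil t lo [] h)
  | cons x xs =>
    obtain ⟨hm', hb'⟩ := listMin_spec x xs
    exact le_antisymm (hb _ hm') (hb' _ hm)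

-- the break-style scan is find?
theorem foldl_break_some {α : Type} (ys : List α) (p : α → Prop) [DecidablePred p] (x : α) :
    ys.foldl (fun acc d => if acc.isSome then acc
      else if p d then some d else none) (some x) = some x := by
  induction ys with
  | nil => rfl
  | cons y ys ih => simpa [List.foldl_cons] using ih

theorem foldl_break_none {α : Type} (ys : List α) (p : α → Prop) [DecidablePred p] :
    ys.foldl (fun acc d => if acc.isSome then acc
      else if p d then some d else none) none = ys.find? (fun d => decide (p d)) := by
  induction ys with
  | nil => rfl
  | cons y ys ih =>
    by_cases hp : p y
    · simp [List.foldl_cons, List.find?, hp, foldl_break_some]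
    · simp [List.foldl_cons, List.find?, hp, ih]

-- find? over range(len(lr)) of a predicate on lr[d] is findIdx? on lr
theorem range_find_idx (lr : List Int) (p : Int → Bool) :
    (PySem.List.pyRange 0 (lr.length : Int) 1).find? (fun d => p (PySem.List.pyGetD lr d 0))
      = (lr.findIdx? p).map (fun (k : Nat) => (k : Int)) := by
  have aux : ∀ (ys : List Int), (List.range ys.length).find? (fun k => p (ys.getD k 0)) = ys.findIdx? p := by
    intro ys
    induction ys with
    | nil => rfl
    | cons x t ih =>
      rw [List.length_cons, List.range_succ_eq_map, List.find?]
      by_cases hp : p ((x :: t).getD 0 0)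
      · simp only [List.getD_cons_zero] at hp
        simp [List.findIdx?_cons, hp]
      · simp only [List.getD_cons_zero] at hp
        rw [List.find?_map]
        simp only [List.findIdx?_cons, hp, if_neg, Bool.false_eq_true, not_false_iff]
        simp only [Function.comp_def, Nat.succ_eq_add_one, List.getD_cons_succ]
        rw [ih]
        simp [hp]
  rw [PySem.List.pyRange_one, List.find?_map]
  have hlen : (((lr.length : Int)) - 0).toNat = lr.length := by omega
  rw [hlen]
  simp only [Function.comp_def, zero_add, PySem.List.pyGetD_natCast]
  rw [aux lr]

-- Python min(..) as a fold keeps the FIRST argmin: characterize it via find?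
def minF {α : Type} (g : α → Int) : Option α → α → Option α := fun acc x =>
  match acc with
  | none => some x
  | some m => if g x < g m then some x else some m

theorem min?_eq_foldl_minF {α : Type} (ys : List α) (g : α → Int) :
    PySem.List.min? ys g = ys.foldl (minF g) none := by
  rfl

theorem minF_some {α : Type} (g : α → Int) (m x : α) :
    minF g (some m) x = if g x < g m then some x else some m := rfl

theorem minF_stay {α : Type} (g : α → Int) (t : List α) :
    ∀ m : α, (∀ z ∈ t, g m ≤ g z) → t.foldl (minF g) (some m) = some m := by
  induction t with
  | nil => intro m _; rfl
  | cons z t ih =>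
    intro m hm
    have hnlt : ¬ g z < g m := not_lt.mpr (hm z (by simp))
    rw [List.foldl_cons, minF_some, if_neg hnlt]
    exact ih m (fun w hw => hm w (List.mem_cons_of_mem _ hw))

theorem minF_found {α : Type} (g : α → Int) (M : Int) (t : List α) :
    ∀ m : α, M < g m → (∀ z ∈ t, M ≤ g z) → (∃ z ∈ t, g z ≤ M) →
      t.foldl (minF g) (some m) = t.find? (fun z => decide (g z ≤ M)) := by
  induction t with
  | nil =>
    intro m _ _ hhit
    simp at hhit
  | cons z t ih =>
    intro m hm hlow hhit
    by_cases hz : g z ≤ M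
    · have hlt : g z < g m := lt_of_le_of_lt hz hm
      rw [List.foldl_cons, minF_some, if_pos hlt]
      rw [minF_stay g t z (fun w hw => le_trans hz (hlow w (List.mem_cons_of_mem _ hw)))]
      simp [List.find?, hz]
    · have hhit' : ∃ w ∈ t, g w ≤ M := by
        obtain ⟨w, hw, hwle⟩ := hhit
        rcases List.mem_cons.mp hw with rfl | hw'
        · exact absurd hwle hz
        · exact ⟨w, hw', hwle⟩
      have hlow' : ∀ w ∈ t, M ≤ g w := fun w hw => hlow w (List.mem_cons_of_mem _ hw)
      rw [List.foldl_cons, minF_some]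
      have hfind : (z :: t).find? (fun z => decide (g z ≤ M)) = t.find? (fun z => decide (g z ≤ M)) := by
        simp [List.find?, hz]
      rw [hfind]
      split_ifs with hzm
      · exact ih z (lt_of_not_ge hz) hlow' hhit'
      · exact ih m hm hlow' hhit'

theorem min?_eq_find_min {α : Type} (ys : List α) (g : α → Int) (M : Int)
    (hlow : ∀ y ∈ ys, M ≤ g y) (hhit : ∃ y ∈ ys, g y ≤ M) :
    PySem.List.min? ys g = ys.find? (fun y => decide (g y ≤ M)) := by
  cases ys with
  | nil => simp at hhit
  | cons y t =>
    rw [min?_eq_foldl_minF, List.foldl_cons]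
    have h0 : minF g none y = some y := rfl
    rw [h0]
    by_cases hy : g y ≤ M
    · rw [minF_stay g t y (fun z hz => le_trans hy (hlow z (List.mem_cons_of_mem _ hz)))]
      simp [List.find?, hy]
    · have hhit' : ∃ w ∈ t, g w ≤ M := by
        obtain ⟨w, hw, hwle⟩ := hhit
        rcases List.mem_cons.mp hw with rfl | hw'
        · exact absurd hwle hy
        · exact ⟨w, hw', hwle⟩
      rw [minF_found g M t y (lt_of_not_ge hy) (fun w hw => hlow w (List.mem_cons_of_mem _ hw)) hhit']
      simp [List.find?, hy]

theorem pick_lt (lr : List Int) (t : Int) (h : lr ≠ []) : pick lr t < lr.length := by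
  unfold pick
  cases hf : lr.findIdx? (fun v => decide (v ≤ t)) with
  | some k => exact (List.findIdx?_eq_some_iff_findIdx_eq.mp hf).1
  | none =>
    cases lr with
    | nil => exact absurd rfl h
    | cons x xs =>
      obtain ⟨hm, _⟩ := listMin_spec x xs
      cases hg : (x :: xs).findIdx? (fun v => decide (v ≤ listMin (x :: xs))) with
      | none =>
        rw [List.findIdx?_eq_none_iff] at hg
        have := hg _ hm
        simp at this
      | some k2 =>
        simpa using (List.findIdx?_eq_some_iff_findIdx_eq.mp hg).1

theorem pySetD_natCast {α : Type} (xs : List α) (k : Nat) (v : α) (h : k < xs.length) :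
    PySem.List.pySetD xs (k : Int) v = xs.set k v := by
  simp [PySem.List.pySetD, PySem.List.pySet?, PySem.List.pyIdx?, h]

-- A's chosen is pick
theorem aStep_chosen (lr : List Int) (t : Int) (h : lr ≠ []) :
    (((PySem.List.pyRange 0 (lr.length : Int) 1).foldl
        (fun acc d => if acc.isSome then acc
          else if t - 1 ≥ PySem.List.pyGetD lr d 0 then some d else none) none).getD
      ((PySem.List.min? (PySem.List.pyRange 0 (lr.length : Int) 1)
          (fun idx => PySem.List.pyGetD lr idx 0)).getD 0))
      = ((pick lr (t - 1) : Nat) : Int) := by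
  rw [foldl_break_none (PySem.List.pyRange 0 (lr.length : Int) 1)
    (fun d => t - 1 ≥ PySem.List.pyGetD lr d 0)]
  have hpred : (fun d => decide (t - 1 ≥ PySem.List.pyGetD lr d 0))
      = (fun d => (fun v => decide (v ≤ t - 1)) (PySem.List.pyGetD lr d 0)) := rfl
  rw [hpred, range_find_idx lr (fun v => decide (v ≤ t - 1))]
  cases hf : lr.findIdx? (fun v => decide (v ≤ t - 1)) with
  | some k => simp only [pick, hf, Option.map_some, Option.getD_some]
  | none =>
    cases lr with
    | nil => exact absurd rfl h
    | cons x xs =>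
      obtain ⟨hmem, hlb⟩ := listMin_spec x xs
      have hlow : ∀ y ∈ PySem.List.pyRange 0 (((x :: xs).length : Nat) : Int) 1,
          listMin (x :: xs) ≤ (fun idx => PySem.List.pyGetD (x :: xs) idx 0) y := by
        intro y hy
        obtain ⟨hy0, hy1⟩ := PySem.List.mem_pyRange_one.mp hy
        have hin : PySem.Raise.InRange (x :: xs).length y := ⟨by omega, by omega⟩
        exact hlb _ (PySem.List.pyGetD_mem _ _ hin)
      have hhit : ∃ y ∈ PySem.List.pyRange 0 (((x :: xs).length : Nat) : Int) 1,
          (fun idx => PySem.List.pyGetD (x :: xs) idx 0) y ≤ listMin (x :: xs) := by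
        obtain ⟨j, hj, hje⟩ := List.mem_iff_getElem.mp hmem
        refine ⟨(j : Int), ?_, ?_⟩
        · exact PySem.List.mem_pyRange_one.mpr ⟨by omega, by exact_mod_cast hj⟩
        · simp only [PySem.List.pyGetD_natCast]
          rw [List.getD_eq_getElem _ _ hj, hje]
      rw [min?_eq_find_min _ _ (listMin (x :: xs)) hlow hhit]
      rw [range_find_idx (x :: xs) (fun v => decide (v ≤ listMin (x :: xs)))]
      cases hg : (x :: xs).findIdx? (fun v => decide (v ≤ listMin (x :: xs))) with
      | none => simp only [pick, hf, hg]; simp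
      | some k2 => simp only [pick, hf, hg]; simp

-- B's chosen is pick
theorem bStep_chosen (tree : DTree) (lr : List Int) (t : Int) (h : DRep tree 0 lr) :
    (if tmin tree ≤ t - 1 then dquery tree (t - 1) else dquery tree (tmin tree))
      = ((pick lr (t - 1) : Nat) : Int) := by
  by_cases hc : tmin tree ≤ t - 1
  · obtain ⟨k, hfi, hk, hq⟩ := rep_query tree 0 lr (t - 1) h hc
    rw [if_pos hc, hq]
    simp only [pick, hfi, zero_add]
  · rw [if_neg hc]
    obtain ⟨k, hfi, hk, hq⟩ := rep_query tree 0 lr (tmin tree) h le_rfl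
    have hnone : lr.findIdx? (fun v => decide (v ≤ t - 1)) = none := by
      rw [List.findIdx?_eq_none_iff]
      intro x hx
      have := (rep_tmin tree 0 lr h).2 x hx
      simp only [decide_eq_false_iff_not, not_le]
      omega
    rw [tmin_eq_listMin tree 0 lr h] at hfi
    rw [hq]
    simp only [pick, hnone, hfi, Option.getD_some, zero_add]

theorem length_pySetD {α : Type} (xs : List α) (i : Int) (v : α) :
    (PySem.List.pySetD xs i v).length = xs.length := by
  unfold PySem.List.pySetD PySem.List.pySet?
  cases h : PySem.List.pyIdx? xs.length i <;> simp

-- one A-step, in terms of pick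
theorem aStep_eq (n : Int) (b : List (List (Int × Int × Int))) (lr : List Int)
    (trip : Int × Int × Int) (hne : lr ≠ []) (hcast : (lr.length : Int) = n) :
    aStep n (b, lr) trip =
      (PySem.List.pySetD b ((pick lr (trip.2.1 - 1) : Nat) : Int)
         (PySem.List.pyGetD b ((pick lr (trip.2.1 - 1) : Nat) : Int) [] ++ [trip]),
       lr.set (pick lr (trip.2.1 - 1)) (trip.2.2 - 1)) := by
  have hch := aStep_chosen lr trip.2.1 hne
  simp only [aStep]
  rw [← hcast, hch]
  rw [pySetD_natCast lr (pick lr (trip.2.1 - 1)) _ (pick_lt lr _ hne)]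

-- one B-step, in terms of pick
theorem bStep_eq (b : List (List (Int × Int × Int))) (tree : DTree) (lr : List Int)
    (trip : Int × Int × Int) (h : DRep tree 0 lr) :
    bStep (b, some tree) trip =
      (PySem.List.pySetD b ((pick lr (trip.2.1 - 1) : Nat) : Int)
         (PySem.List.pyGetD b ((pick lr (trip.2.1 - 1) : Nat) : Int) [] ++ [trip]),
       some (dupdate tree ((pick lr (trip.2.1 - 1) : Nat) : Int) (trip.2.2 - 1))) := by
  have hch := bStep_chosen tree lr trip.2.1 h
  simp only [bStep]
  rw [hch]

-- the two assignment loops agree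
theorem loop_inv (n : Int) (hn : 1 ≤ n) (ts : List (Int × Int × Int)) :
    ∀ (b : List (List (Int × Int × Int))) (lr : List Int) (tree : DTree),
      DRep tree 0 lr → lr.length = n.toNat →
      (ts.foldl (aStep n) (b, lr)).1 = (ts.foldl bStep (b, some tree)).1 ∧
      (ts.foldl (aStep n) (b, lr)).1.length = b.length ∧
      ∃ tree', (ts.foldl bStep (b, some tree)).2 = some tree' ∧
        DRep tree' 0 (ts.foldl (aStep n) (b, lr)).2 ∧
        (ts.foldl (aStep n) (b, lr)).2.length = n.toNat := by
  induction ts with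
  | nil =>
    intro b lr tree hrep hlen
    exact ⟨rfl, rfl, tree, rfl, hrep, hlen⟩
  | cons trip ts ih =>
    intro b lr tree hrep hlen
    have hne : lr ≠ [] := by
      intro hc
      subst hc
      simp at hlen
      omega
    have hcast : (lr.length : Int) = n := by omega
    have hklt : pick lr (trip.2.1 - 1) < lr.length := pick_lt lr _ hne
    rw [List.foldl_cons, List.foldl_cons, aStep_eq n b lr trip hne hcast, bStep_eq b tree lr trip hrep]
    have hrep' : DRep (dupdate tree ((pick lr (trip.2.1 - 1) : Nat) : Int) (trip.2.2 - 1)) 0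
        (lr.set (pick lr (trip.2.1 - 1)) (trip.2.2 - 1)) := by
      have h0 : (((pick lr (trip.2.1 - 1) : Nat) : Int) - 0).toNat = pick lr (trip.2.1 - 1) := by omega
      have := rep_update tree 0 lr ((pick lr (trip.2.1 - 1) : Nat) : Int) (trip.2.2 - 1) hrep
        (by omega) (by omega)
      rwa [h0] at this
    have hlen' : (lr.set (pick lr (trip.2.1 - 1)) (trip.2.2 - 1)).length = n.toNat := by
      simp [hlen]
    obtain ⟨h1, h2, tree', h3, h4, h5⟩ := ih
      (PySem.List.pySetD b ((pick lr (trip.2.1 - 1) : Nat) : Int)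
        (PySem.List.pyGetD b ((pick lr (trip.2.1 - 1) : Nat) : Int) [] ++ [trip]))
      (lr.set (pick lr (trip.2.1 - 1)) (trip.2.2 - 1))
      (dupdate tree ((pick lr (trip.2.1 - 1) : Nat) : Int) (trip.2.2 - 1)) hrep' hlen'
    exact ⟨h1, h2.trans (length_pySetD _ _ _), tree', h3, h4, h5⟩

-- inner triple-append fold of A's output phase
theorem inner3_fold (q : List (Int × Int × Int)) (x y z : List Int) :
    q.foldl (fun o t => (o.1 ++ [t.1], o.2.1 ++ [t.2.1], o.2.2 ++ [t.2.2])) (x, y, z)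
      = (x ++ q.map (·.1), y ++ q.map (·.2.1), z ++ q.map (·.2.2)) := by
  induction q generalizing x y z with
  | nil => simp
  | cons t q ih => simp [List.foldl_cons, ih]

-- generic: A's per-drone emission fold equals B's rows construction
theorem phase2_core (ps : List (Int × List (Int × Int × Int))) (lim : Int) :
    ∀ acc : List (Int × Int × Int),
      ps.foldl (fun o p =>
          let o1 := p.2.foldl (fun o t => (o.1 ++ [t.1], o.2.1 ++ [t.2.1], o.2.2 ++ [t.2.2])) o
          if p.1 < lim then (o1.1 ++ [-1], o1.2.1 ++ [-1], o1.2.2 ++ [-1]) else o1)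
        (acc.map (·.1), acc.map (·.2.1), acc.map (·.2.2))
      = ((ps.foldl (fun a p => let a2 := a ++ p.2; if p.1 < lim then a2 ++ [(-1, -1, -1)] else a2) acc).map (·.1),
         (ps.foldl (fun a p => let a2 := a ++ p.2; if p.1 < lim then a2 ++ [(-1, -1, -1)] else a2) acc).map (·.2.1),
         (ps.foldl (fun a p => let a2 := a ++ p.2; if p.1 < lim then a2 ++ [(-1, -1, -1)] else a2) acc).map (·.2.2)) := by
  induction ps with
  | nil => intro acc; simp
  | cons p ps ih =>
    intro acc
    simp only [List.foldl_cons]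
    by_cases hp : p.1 < lim
    · simp only [inner3_fold, if_pos hp]
      have heq : (acc.map (·.1) ++ p.2.map (·.1) ++ [(-1 : Int)],
          acc.map (·.2.1) ++ p.2.map (·.2.1) ++ [(-1 : Int)],
          acc.map (·.2.2) ++ p.2.map (·.2.2) ++ [(-1 : Int)])
          = ((acc ++ p.2 ++ [((-1 : Int), (-1 : Int), (-1 : Int))]).map (·.1),
             (acc ++ p.2 ++ [((-1 : Int), (-1 : Int), (-1 : Int))]).map (·.2.1),
             (acc ++ p.2 ++ [((-1 : Int), (-1 : Int), (-1 : Int))]).map (·.2.2)) := by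
        simp
      rw [heq, ih (acc ++ p.2 ++ [((-1 : Int), (-1 : Int), (-1 : Int))])]
    · simp only [inner3_fold, if_neg hp]
      have heq : (acc.map (·.1) ++ p.2.map (·.1),
          acc.map (·.2.1) ++ p.2.map (·.2.1),
          acc.map (·.2.2) ++ p.2.map (·.2.2))
          = ((acc ++ p.2).map (·.1), (acc ++ p.2).map (·.2.1), (acc ++ p.2).map (·.2.2)) := by
        simp
      rw [heq, ih (acc ++ p.2)]

-- the two output phases agree on equal job lists
theorem phase2_eq (jobs : List (List (Int × Int × Int))) (n : Int) (h : jobs.length = n.toNat) :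
    (PySem.List.pyRange 0 n 1).foldl
      (fun o d =>
        let o1 := (PySem.List.pyGetD jobs d []).foldl
          (fun o t => (o.1 ++ [t.1], o.2.1 ++ [t.2.1], o.2.2 ++ [t.2.2])) o
        if d < n - 1 then (o1.1 ++ [-1], o1.2.1 ++ [-1], o1.2.2 ++ [-1]) else o1)
      ([], [], [])
    = ((((PySem.List.enumerate jobs).foldl
          (fun acc p => let a2 := acc ++ p.2; if p.1 < n - 1 then a2 ++ [(-1, -1, -1)] else a2)
          ([] : List (Int × Int × Int))).map (·.1)),
       (((PySem.List.enumerate jobs).foldl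
          (fun acc p => let a2 := acc ++ p.2; if p.1 < n - 1 then a2 ++ [(-1, -1, -1)] else a2)
          ([] : List (Int × Int × Int))).map (·.2.1)),
       (((PySem.List.enumerate jobs).foldl
          (fun acc p => let a2 := acc ++ p.2; if p.1 < n - 1 then a2 ++ [(-1, -1, -1)] else a2)
          ([] : List (Int × Int × Int))).map (·.2.2))) := by
  by_cases hn0 : 0 ≤ n
  · have hcast : ((jobs.length : Nat) : Int) = n := by omega
    rw [← hcast]
    have key : (PySem.List.pyRange 0 (jobs.length : Int) 1).foldl
        (fun o d =>
          let o1 := (PySem.List.pyGetD jobs d []).foldl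
            (fun o t => (o.1 ++ [t.1], o.2.1 ++ [t.2.1], o.2.2 ++ [t.2.2])) o
          if d < (jobs.length : Int) - 1 then (o1.1 ++ [-1], o1.2.1 ++ [-1], o1.2.2 ++ [-1]) else o1)
        ([], [], [])
      = (PySem.List.enumerate jobs).foldl
        (fun o p =>
          let o1 := p.2.foldl
            (fun o t => (o.1 ++ [t.1], o.2.1 ++ [t.2.1], o.2.2 ++ [t.2.2])) o
          if p.1 < (jobs.length : Int) - 1 then (o1.1 ++ [-1], o1.2.1 ++ [-1], o1.2.2 ++ [-1]) else o1)
        ([], [], []) := by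
      rw [PySem.List.enumerate_eq_map_pyRange jobs ([] : List (Int × Int × Int)), List.foldl_map]
      simp [PySem.List.len_eq]
    rw [key]
    have h2 := phase2_core (PySem.List.enumerate jobs) ((jobs.length : Int) - 1) []
    simpa using h2
  · have hjobs : jobs = [] := by
      have : jobs.length = 0 := by omega
      exact List.eq_nil_of_length_eq_zero this
    subst hjobs
    have hr : PySem.List.pyRange 0 n 1 = [] := PySem.List.pyRange_one_eq_nil (by omega)
    simp [hr]

-- ===== VERDICT (by name: the statement is the Claim_ definition above) =====
theorem assign_trips_to_drones_py_spec : Claim_equal_assign_trips_to_drones_py := by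
  intro cts n hdom hpre
  unfold Spec_assign_trips_to_drones_py
  by_cases hn : 1 ≤ n
  · simp only [assign_trips_to_drones_py, assign_trips_to_drones_py_alt, if_pos hn]
    have hinit : (PySem.List.pyRange 0 n 1).map (fun _ => (-1 : Int)) = List.replicate n.toNat (-1) := by
      rw [List.map_const', PySem.List.length_pyRange_one]
      norm_num
    rw [hinit]
    obtain ⟨hb, hblen, tree', hB2, hrep', hlen'⟩ :=
      loop_inv n hn (PySem.List.sorted cts (fun item => item.2.1) false)
        ((PySem.List.pyRange 0 n 1).map (fun _ => ([] : List (Int × Int × Int))))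
        (List.replicate n.toNat (-1)) (dbuild 0 n.toNat) (rep_build n.toNat 0 (by omega)) (by simp)
    rw [hb] at hblen ⊢
    have hjlen : ((PySem.List.sorted cts (fun item => item.2.1) false).foldl bStep
        ((PySem.List.pyRange 0 n 1).map (fun _ => ([] : List (Int × Int × Int))),
         some (dbuild 0 n.toNat))).1.length = n.toNat := by
      rw [hblen]
      simp [PySem.List.length_pyRange_one]
    exact phase2_eq _ n hjlen
  · have hcts : cts = [] := by
      rcases hpre with h | h
      · exact h
      · exact absurd h hn
    subst hcts
    simp only [assign_trips_to_drones_py, assign_trips_to_drones_py_alt]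
    rw [(PySem.List.sorted_eq_nil_iff ([] : List (Int × Int × Int)) (fun item : Int × Int × Int => item.2.1) false).mpr rfl]
    simp only [List.foldl_nil]
    have hjlen : ((PySem.List.pyRange 0 n 1).map (fun _ => ([] : List (Int × Int × Int)))).length = n.toNat := by
      simp [PySem.List.length_pyRange_one]
    exact phase2_eq _ n hjlen
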